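-- pv_equiv track=rewrite | github.com/alecramsay/T | t/expressions.py | get_slice_tokens
-- ===== SOURCE A (Python) =====
-- def get_slice_tokens(tokens: list[str]) -> tuple[str, int]:
--     """Return a slice expression (as string) and how many tokens it consumes or None, 0 if not a slice."""
--
--     state: str = ""
--
--     expr: str = ""
--     skip: int = 0
--
--     for i, tok in enumerate(tokens):
--         if i == 0:
--             expr = expr + tok  # When called, the first token is an open bracket '['
--             state = "open"
--             skip = 1
--             continue
--
--         if state == "open":
--             if is_int(tok):
--                 state = "start"
--                 expr = expr + str(tok)
--                 skip = skip + 1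
--                 continue
--
--             if tok == ":":  # Slice with no start #
--                 state = "colon"
--                 expr = expr + tok
--                 skip = skip + 1
--                 continue
--
--             return "", 0
--
--         if state == "start":
--             if tok == ":":  # Slice with start #
--                 state = "colon"
--                 expr = expr + tok
--                 skip = skip + 1
--                 continue
--
--             return "", 0
--
--         if state == "colon":
--             if is_int(tok):
--                 state = "stop"
--                 expr = expr + str(tok)
--                 skip = skip + 1
--                 continue
--
--             if tok == "]":  # Slice with no stop #
--                 state = "close"
--                 expr = expr + tok
--                 skip = skip + 1
--                 continue
--
--             return "", 0
--
--         if state == "stop":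
--             if tok == "]":  # Slice with no stop #
--                 state = "close"
--                 expr = expr + tok
--                 skip = skip + 1
--                 continue
--
--             return "", 0
--
--         if state == "close":
--             return expr, skip  # More tokens after slice
--
--     if state == "close":
--         return expr, skip  # No more tokens after slice
--
--     # Potential slice not completed
--     return "", 0
--
-- def is_int(tok: str) -> bool:
--     """Return True if tok is an integer, else False."""
--
--     try:
--         int(tok)
--         return True
--     except ValueError:
--         return False
-- ===== SOURCE B (Python) =====
-- def is_int(tok: str) -> bool:
--     """Return True if tok is an integer, else False."""
--     try:
--         int(tok)
--         return True
--     except ValueError: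
--         return False
--
--
-- def get_slice_tokens(tokens: list[str]) -> tuple[str, int]:
--     """Straight-line parse of '[ (int)? : (int)? ]'; returns (expr, tokens consumed) or ('', 0)."""
--     if not tokens:
--         return "", 0
--     expr, rest, n = tokens[0], tokens[1:], 1
--     if rest and is_int(rest[0]):
--         expr, rest, n = expr + rest[0], rest[1:], n + 1
--     if not rest or rest[0] != ":":
--         return "", 0
--     expr, rest, n = expr + ":", rest[1:], n + 1
--     if rest and is_int(rest[0]):
--         expr, rest, n = expr + rest[0], rest[1:], n + 1
--     if not rest or rest[0] != "]":
--         return "", 0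
--     return expr + "]", n + 1
-- ===== Notes on version B (the rewrite author's own statement) =====
-- stated objective: simpler
-- what changed: Replaced A's enumerate loop with a string-valued state variable by a straight-line parser that consumes the optional start int, the mandatory ':', the optional stop int and the mandatory ']' in four sequential conditional steps over the list tail, with no loop and no state variable.
import Mathlib
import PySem

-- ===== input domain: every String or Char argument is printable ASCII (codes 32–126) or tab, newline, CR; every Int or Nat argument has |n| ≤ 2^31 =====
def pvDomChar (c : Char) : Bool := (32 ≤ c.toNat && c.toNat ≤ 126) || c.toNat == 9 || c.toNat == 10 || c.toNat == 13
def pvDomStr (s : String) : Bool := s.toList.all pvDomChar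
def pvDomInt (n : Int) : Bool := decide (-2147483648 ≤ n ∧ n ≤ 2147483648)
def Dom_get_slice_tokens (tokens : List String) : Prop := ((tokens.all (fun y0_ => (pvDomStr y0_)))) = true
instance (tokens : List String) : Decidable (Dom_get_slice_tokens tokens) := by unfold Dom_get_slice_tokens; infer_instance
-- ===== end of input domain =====

-- B replaces A's string-state loop over enumerate with a straight-line conditional parser
-- over the tail of the token list (objective: simpler); return values are proved equal on all inputs.


-- shared helper: Python's is_int (int(tok) succeeds)
def is_int (tok : String) : Bool := (PySem.Int.ofStr? tok).isSome

-- ===== PORT A =====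
-- A's enumerate loop after the fixed i = 0 step: state machine over the remaining tokens
def gstLoop (state expr : String) (skip : Int) : List String → String × Int
  | [] => if state = "close" then (expr, skip) else ("", 0)
  | tok :: rest =>
    if state = "open" then
      if is_int tok then gstLoop "start" (expr ++ tok) (skip + 1) rest
      else if tok = ":" then gstLoop "colon" (expr ++ tok) (skip + 1) rest
      else ("", 0)
    else if state = "start" then
      if tok = ":" then gstLoop "colon" (expr ++ tok) (skip + 1) rest
      else ("", 0)
    else if state = "colon" then
      if is_int tok then gstLoop "stop" (expr ++ tok) (skip + 1) rest
      else if tok = "]" then gstLoop "close" (expr ++ tok) (skip + 1) rest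
      else ("", 0)
    else if state = "stop" then
      if tok = "]" then gstLoop "close" (expr ++ tok) (skip + 1) rest
      else ("", 0)
    else if state = "close" then (expr, skip)
    else gstLoop state expr skip rest   -- unreachable: state "" only before the i = 0 step

def get_slice_tokens (tokens : List String) : String × Int :=
  match tokens with
  | [] => ("", 0)            -- loop never runs; state "" ≠ "close"
  | t0 :: rest => gstLoop "open" ("" ++ t0) 1 rest   -- the i = 0 iteration

-- ===== PORT B =====
def get_slice_tokens_alt (tokens : List String) : String × Int :=
  match tokens with
  | [] => ("", 0)
  | t0 :: rest0 =>
    -- optional start integer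
    let (expr1, rest1, n1) : String × List String × Int :=
      match rest0 with
      | t :: r => if is_int t then (t0 ++ t, r, 2) else (t0, rest0, 1)
      | [] => (t0, rest0, 1)
    match rest1 with
    | [] => ("", 0)
    | t :: r =>
      if t ≠ ":" then ("", 0)
      else
        let expr2 := expr1 ++ ":"
        let n2 := n1 + 1
        -- optional stop integer
        let (expr3, rest3, n3) : String × List String × Int :=
          match r with
          | u :: r' => if is_int u then (expr2 ++ u, r', n2 + 1) else (expr2, r, n2)
          | [] => (expr2, r, n2)
        match rest3 with
        | [] => ("", 0)
        | u :: _ => if u ≠ "]" then ("", 0) else (expr3 ++ "]", n3 + 1)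

-- ===== PRECONDITION & SPEC =====
def Spec_get_slice_tokens (tokens : List String) (out : String × Int) : Prop := out = get_slice_tokens_alt tokens
instance (tokens : List String) (out : String × Int) : Decidable (Spec_get_slice_tokens tokens out) := by unfold Spec_get_slice_tokens; infer_instance

-- ===== CLAIM (what is proved, stated in full; the proofs are below) =====
def Claim_equal_get_slice_tokens : Prop := ∀ (tokens : List String), Dom_get_slice_tokens tokens → Spec_get_slice_tokens tokens (get_slice_tokens tokens)

-- ===== LEMMAS AND PROOFS =====

-- once A reaches state "close" it returns (expr, skip) whatever tokens remain
theorem gstLoop_close (expr : String) (skip : Int) (l : List String) :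
    gstLoop "close" expr skip l = (expr, skip) := by
  cases l <;> simp [gstLoop]

-- ===== VERDICT (by name: the statement is the Claim_ definition above) =====
theorem get_slice_tokens_spec : Claim_equal_get_slice_tokens := by
  intro tokens _
  unfold Spec_get_slice_tokens
  match tokens with
  | [] => rfl
  | [t0] => simp [get_slice_tokens, get_slice_tokens_alt, gstLoop]
  | t0 :: t1 :: rest =>
    simp only [get_slice_tokens, get_slice_tokens_alt, String.empty_append]
    by_cases h1 : is_int t1 = true
    · -- start integer present
      match rest with
      | [] => simp [gstLoop, h1]
      | t2 :: rest2 =>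
        by_cases h2 : t2 = ":"
        · subst h2
          match rest2 with
          | [] => simp [gstLoop, h1]
          | t3 :: rest3 =>
            by_cases h3 : is_int t3 = true
            · match rest3 with
              | [] => simp [gstLoop, h1, h3]
              | t4 :: rest4 =>
                by_cases h4 : t4 = "]"
                · subst h4; simp [gstLoop, h1, h3, gstLoop_close]
                · simp [gstLoop, h1, h3, h4]
            · by_cases h3' : t3 = "]"
              · subst h3'; simp [gstLoop, h1, h3, gstLoop_close]
              · simp [gstLoop, h1, h3, h3']
        · simp [gstLoop, h1, h2]
    · -- no start integer: t1 must be ":"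
      by_cases h2 : t1 = ":"
      · subst h2
        match rest with
        | [] => simp [gstLoop, h1]
        | t2 :: rest2 =>
          by_cases h3 : is_int t2 = true
          · match rest2 with
            | [] => simp [gstLoop, h1, h3]
            | t3 :: rest3 =>
              by_cases h4 : t3 = "]"
              · subst h4; simp [gstLoop, h1, h3, gstLoop_close]
              · simp [gstLoop, h1, h3, h4]
          · by_cases h3' : t2 = "]"
            · subst h3'; simp [gstLoop, h1, h3, gstLoop_close]
            · simp [gstLoop, h1, h3, h3']
      · simp [gstLoop, h1, h2]
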